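-- pv_equiv track=rewrite | github.com/jrb00013/Lydlr | backend/api/device_topics.py | filter_topics_by_device_type
-- ===== SOURCE A (Python) =====
-- from typing import Dict, List, Optional
--
-- def filter_topics_by_device_type(topics: List[str], device_type: str) -> List[str]:
--     """Filter topics to only include relevant ones for device type"""
--     device_type_lower = device_type.lower()
--
--     # Keep all base topics (status, metadata, etc.)
--     relevant = [t for t in topics if any(base in t for base in [
--         "/status", "/metadata", "/heartbeat", "/location", "/ip_address",
--         "/diagnostics", "/telemetry", "/errors", "/warnings", "/cmd/"
--     ])]
--
--     # Add device-specific topics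
--     if device_type_lower in ['camera', 'stereo_camera', 'depth_camera', 'thermal_camera']:
--         relevant.extend([t for t in topics if 'image' in t or 'camera' in t])
--     elif device_type_lower == 'lidar':
--         relevant.extend([t for t in topics if 'points' in t or 'scan' in t or 'lidar' in t])
--     elif device_type_lower == 'imu':
--         relevant.extend([t for t in topics if 'imu' in t])
--     elif device_type_lower == 'gps':
--         relevant.extend([t for t in topics if 'gps' in t])
--     elif 'motor' in device_type_lower:
--         relevant.extend([t for t in topics if 'motor' in t])
--     elif device_type_lower == 'actuator':
--         relevant.extend([t for t in topics if 'actuator' in t])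
--     elif device_type_lower == 'power_supply':
--         relevant.extend([t for t in topics if any(x in t for x in ['voltage', 'current', 'power', 'battery'])])
--
--     # Add sensor topics
--     relevant.extend([t for t in topics if '/sensor/' in t])
--
--     return list(set(relevant))  # Remove duplicates
-- ===== SOURCE B (Python) =====
-- # B: precompute one keyword list (base + device-specific + '/sensor/'), single pass over topics,
-- # return the deduplicated matches in sorted order (deterministic; output is compared as a set).
-- _BASE = ["/status", "/metadata", "/heartbeat", "/location", "/ip_address",
--          "/diagnostics", "/telemetry", "/errors", "/warnings", "/cmd/"]
--
-- def filter_topics_by_device_type(topics, device_type):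
--     d = device_type.lower()
--     if d in ('camera', 'stereo_camera', 'depth_camera', 'thermal_camera'):
--         dev = ['image', 'camera']
--     elif d == 'lidar':
--         dev = ['points', 'scan', 'lidar']
--     elif d == 'imu':
--         dev = ['imu']
--     elif d == 'gps':
--         dev = ['gps']
--     elif 'motor' in d:
--         dev = ['motor']
--     elif d == 'actuator':
--         dev = ['actuator']
--     elif d == 'power_supply':
--         dev = ['voltage', 'current', 'power', 'battery']
--     else:
--         dev = []
--     keywords = _BASE + dev + ['/sensor/']
--     return sorted({t for t in topics if any(kw in t for kw in keywords)})
-- ===== Notes on version B (the rewrite author's own statement) =====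
-- stated objective: simpler
-- what changed: A's per-category comprehension-and-extend passes over topics are replaced by one precomputed keyword list (base + device-specific + '/sensor/') and a single filtering pass; the deduplicated result is emitted sorted (deterministic), equal to A's list(set(...)) as a set.
import Mathlib
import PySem

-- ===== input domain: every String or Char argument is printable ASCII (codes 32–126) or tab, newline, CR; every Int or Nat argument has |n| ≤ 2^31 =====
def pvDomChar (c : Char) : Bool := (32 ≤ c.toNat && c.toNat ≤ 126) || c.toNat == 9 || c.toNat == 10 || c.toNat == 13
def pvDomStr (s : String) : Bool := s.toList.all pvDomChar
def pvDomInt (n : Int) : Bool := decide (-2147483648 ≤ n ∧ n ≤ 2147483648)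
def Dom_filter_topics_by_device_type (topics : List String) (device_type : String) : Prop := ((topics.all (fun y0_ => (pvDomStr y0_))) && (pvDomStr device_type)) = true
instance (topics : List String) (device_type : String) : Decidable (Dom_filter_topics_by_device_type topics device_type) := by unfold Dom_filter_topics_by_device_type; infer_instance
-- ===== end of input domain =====

-- B replaces A's several comprehension-and-extend passes by one precomputed keyword list and a single
-- filtering pass; both emit list(set(...)) in sorted order (outputs of this task are compared as sets).


-- ===== PORT A =====
def pvBaseKeywords : List String :=
  ["/status", "/metadata", "/heartbeat", "/location", "/ip_address",
   "/diagnostics", "/telemetry", "/errors", "/warnings", "/cmd/"]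

def filter_topics_by_device_type (topics : List String) (device_type : String) : List String :=
  let device_type_lower := PySem.Str.lower device_type
  -- relevant = [t for t in topics if any(base in t for base in [...])]
  let relevant := topics.filter (fun t => pvBaseKeywords.any (fun base => PySem.Str.isIn base t))
  -- the if/elif chain of device-specific extends
  let relevant :=
    if ["camera", "stereo_camera", "depth_camera", "thermal_camera"].contains device_type_lower then
      relevant ++ topics.filter (fun t => PySem.Str.isIn "image" t || PySem.Str.isIn "camera" t)
    else if device_type_lower == "lidar" then
      relevant ++ topics.filter (fun t => PySem.Str.isIn "points" t || PySem.Str.isIn "scan" t || PySem.Str.isIn "lidar" t)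
    else if device_type_lower == "imu" then
      relevant ++ topics.filter (fun t => PySem.Str.isIn "imu" t)
    else if device_type_lower == "gps" then
      relevant ++ topics.filter (fun t => PySem.Str.isIn "gps" t)
    else if PySem.Str.isIn "motor" device_type_lower then
      relevant ++ topics.filter (fun t => PySem.Str.isIn "motor" t)
    else if device_type_lower == "actuator" then
      relevant ++ topics.filter (fun t => PySem.Str.isIn "actuator" t)
    else if device_type_lower == "power_supply" then
      relevant ++ topics.filter (fun t => (["voltage", "current", "power", "battery"] : List String).any (fun x => PySem.Str.isIn x t))
    else relevant
  -- relevant.extend([t for t in topics if '/sensor/' in t])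
  let relevant := relevant ++ topics.filter (fun t => PySem.Str.isIn "/sensor/" t)
  -- list(set(relevant)): CPython's hash iteration order is not modelled; the set is emitted in sorted
  -- order, which is exact as a set (this task's outputs are compared as sets).
  PySem.List.sorted (PySem.Set.ofList relevant) (fun x => x) false

-- ===== PORT B =====
def filter_topics_by_device_type_alt (topics : List String) (device_type : String) : List String :=
  let d := PySem.Str.lower device_type
  let dev : List String :=
    if ["camera", "stereo_camera", "depth_camera", "thermal_camera"].contains d then ["image", "camera"]
    else if d == "lidar" then ["points", "scan", "lidar"]
    else if d == "imu" then ["imu"]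
    else if d == "gps" then ["gps"]
    else if PySem.Str.isIn "motor" d then ["motor"]
    else if d == "actuator" then ["actuator"]
    else if d == "power_supply" then ["voltage", "current", "power", "battery"]
    else []
  let keywords := pvBaseKeywords ++ dev ++ ["/sensor/"]
  -- sorted({t for t in topics if any(kw in t for kw in keywords)})
  PySem.List.sorted
    (PySem.Set.ofList (topics.filter (fun t => keywords.any (fun kw => PySem.Str.isIn kw t))))
    (fun x => x) false

-- ===== PRECONDITION & SPEC =====
def Spec_filter_topics_by_device_type (topics : List String) (device_type : String) (out : List String) : Prop := out = filter_topics_by_device_type_alt topics device_type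
instance (topics : List String) (device_type : String) (out : List String) : Decidable (Spec_filter_topics_by_device_type topics device_type out) := by unfold Spec_filter_topics_by_device_type; infer_instance

-- ===== CLAIM (what is proved, stated in full; the proofs are below) =====
def Claim_equal_filter_topics_by_device_type : Prop := ∀ (topics : List String) (device_type : String), Dom_filter_topics_by_device_type topics device_type → Spec_filter_topics_by_device_type topics device_type (filter_topics_by_device_type topics device_type)

-- ===== LEMMAS AND PROOFS =====

-- sorting two deduplicated lists with the same members gives the same list
theorem pv_sorted_ofList_eq_of_mem_iff (l₁ l₂ : List String)
    (h : ∀ x, x ∈ l₁ ↔ x ∈ l₂) :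
    PySem.List.sorted (PySem.Set.ofList l₁) (fun x => x) false
      = PySem.List.sorted (PySem.Set.ofList l₂) (fun x => x) false := by
  apply PySem.List.sorted_eq_sorted_of_perm _ _ _ (fun a b hab => hab)
  refine (List.perm_ext_iff_of_nodup (PySem.Set.nodup_ofList l₁) (PySem.Set.nodup_ofList l₂)).mpr ?_
  intro x
  simp [PySem.Set.mem_ofList, h x]

-- membership in A's three concatenated filter passes = membership in one filter with the joined predicate
theorem pv_mem_filter3 {α : Type} (topics : List α) (p q s : α → Bool) (x : α) :
    x ∈ (topics.filter p ++ topics.filter q) ++ topics.filter s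
      ↔ x ∈ topics.filter (fun t => (p t || q t) || s t) := by
  simp [List.mem_filter]; tauto

-- the two-pass variant (no device-specific branch fires)
theorem pv_mem_filter2 {α : Type} (topics : List α) (p s : α → Bool) (x : α) :
    x ∈ topics.filter p ++ topics.filter s ↔ x ∈ topics.filter (fun t => p t || s t) := by
  simp [List.mem_filter]; tauto

theorem filter_topics_membership (topics : List String) (device_type : String) :
    filter_topics_by_device_type topics device_type
      = filter_topics_by_device_type_alt topics device_type := by
  unfold filter_topics_by_device_type filter_topics_by_device_type_alt
  dsimp only
  split_ifs <;>
    (apply pv_sorted_ofList_eq_of_mem_iff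
     intro x
     first
       | rw [pv_mem_filter3]
       | rw [pv_mem_filter2]
     simp [List.mem_filter, pvBaseKeywords, Bool.or_assoc])

-- ===== VERDICT (by name: the statement is the Claim_ definition above) =====
theorem filter_topics_by_device_type_spec : Claim_equal_filter_topics_by_device_type := by
  intro topics device_type _
  unfold Spec_filter_topics_by_device_type
  exact filter_topics_membership topics device_type
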